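-- pv_equiv track=rewrite | github.com/Yoon-men/CodingTest | BaekJoon/9935.py | joyGo
-- ===== SOURCE A (Python) =====
-- def joyGo(string: str, bakuhatsu: str) -> str:
--     stack = []
--
--     bakuhatsu = list(bakuhatsu)
--
--     for s in string:
--         stack.append(s)
--         if stack[len(stack) - len(bakuhatsu):] == bakuhatsu:
--             for _ in range(len(bakuhatsu)):
--                 stack.pop()
--
--     if stack:
--         return ''.join(stack)
--     else:
--         return "FRULA"
-- ===== SOURCE B (Python) =====
-- def joyGo(string: str, bakuhatsu: str) -> str:
--     # Different algorithm: instead of a single left-to-right stack pass, repeatedly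
--     # delete the LEFTMOST occurrence of the bomb from the whole string until none
--     # remains.  This computes the same result as the stack scan: all occurrences
--     # have equal length, so the occurrence with the earliest end (the one the
--     # stack removes first) is exactly the leftmost one, and after deleting it the
--     # remaining prefix is still bomb-free.
--     s = string
--     if bakuhatsu:
--         i = s.find(bakuhatsu)
--         while i != -1:
--             s = s[:i] + s[i + len(bakuhatsu):]
--             i = s.find(bakuhatsu)
--     return s if s else "FRULA"
-- ===== Notes on version B (the rewrite author's own statement) =====
-- stated objective: alternative
-- what changed: Replaces A's single-pass push/check-suffix/pop stack scan by a fixpoint loop that repeatedly finds the leftmost occurrence of the bomb in the whole string and splices it out until none remains; equal results because equal-length occurrences make the earliest-ending occurrence the leftmost one.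
import Mathlib
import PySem

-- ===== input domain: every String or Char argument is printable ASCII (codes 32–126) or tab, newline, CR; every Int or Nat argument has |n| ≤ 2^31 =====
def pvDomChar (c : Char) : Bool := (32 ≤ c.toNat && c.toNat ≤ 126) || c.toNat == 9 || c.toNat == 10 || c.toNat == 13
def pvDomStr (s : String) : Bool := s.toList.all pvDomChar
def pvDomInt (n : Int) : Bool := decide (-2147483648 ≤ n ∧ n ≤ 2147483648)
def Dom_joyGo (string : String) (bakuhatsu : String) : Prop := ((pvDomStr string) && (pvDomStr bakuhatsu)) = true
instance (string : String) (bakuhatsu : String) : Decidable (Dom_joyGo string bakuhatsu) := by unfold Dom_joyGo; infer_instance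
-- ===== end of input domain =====

-- B replaces A's single-pass stack scan by a fixpoint loop deleting the leftmost bomb
-- occurrence until none remains; alternative algorithm, same results.

-- ===== PORT A =====
-- the loop: push each char, compare the length-m suffix slice with the bomb, pop m times on a match
def joyGoLoopA (bak : List Char) : List Char → List Char → List Char
  | stack, [] => stack
  | stack, s :: rest =>
    let st := stack ++ [s]
    let st' :=
      if PySem.List.slice st (some ((st.length : Int) - (bak.length : Int))) none = bak then
        -- for _ in range(len(bakuhatsu)): stack.pop()  (the guard guarantees the stack is long
        -- enough, so Python's pop never raises; dropLast is exact here)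
        (List.range bak.length).foldl (fun t _ => t.dropLast) st
      else st
    joyGoLoopA bak st' rest

def joyGo (string : String) (bakuhatsu : String) : String :=
  let bak := bakuhatsu.toList
  let stack := joyGoLoopA bak [] string.toList
  if stack ≠ [] then String.ofList stack else "FRULA"

-- ===== PORT B =====
-- needed by fixLoop's decreasing_by, so it stays above the port (cited there by name)
theorem find_shrinks (b s : List Char) (hb : b ≠ []) (h : PySem.Chars.find s b ≠ -1) :
    (s.take (PySem.Chars.find s b).toNat ++ s.drop ((PySem.Chars.find s b).toNat + b.length)).length
      < s.length := by
  have h0 : 0 ≤ PySem.Chars.find s b := by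
    have := PySem.Chars.neg_one_le_find s b; omega
  obtain ⟨t, ht⟩ := (PySem.Chars.find_spec (s := s) (sub := b) h0).1
  have hlen : (PySem.Chars.find s b).toNat + b.length ≤ s.length := by
    have := congrArg List.length ht
    simp [List.length_drop] at this
    have hle : (PySem.Chars.find s b).toNat ≤ s.length := by
      have := PySem.Chars.find_le_length s b; omega
    omega
  have hbpos : 0 < b.length := List.length_pos_iff.mpr hb
  simp [List.length_take, List.length_drop]
  omega

-- while i != -1: s = s[:i] + s[i+len(b):]; i = s.find(b)
-- (the 'b = []' guard is unreachable — joyGo_alt only calls fixLoop when bakuhatsu is nonempty —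
--  and only makes the recursion total; i ≥ 0 here, so Python's slices are exactly take/drop)
def fixLoop (b : List Char) (s : List Char) : List Char :=
  if hb : b = [] then s
  else
    let i := PySem.Chars.find s b
    if hi : i = -1 then s
    else fixLoop b (s.take i.toNat ++ s.drop (i.toNat + b.length))
termination_by s.length
decreasing_by exact find_shrinks b s hb hi

def joyGo_alt (string : String) (bakuhatsu : String) : String :=
  let s := string.toList
  let s := if bakuhatsu.toList ≠ [] then fixLoop bakuhatsu.toList s else s
  if s ≠ [] then String.ofList s else "FRULA"

-- ===== PRECONDITION & SPEC =====
def Spec_joyGo (string : String) (bakuhatsu : String) (out : String) : Prop := out = joyGo_alt string bakuhatsu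
instance (string : String) (bakuhatsu : String) (out : String) : Decidable (Spec_joyGo string bakuhatsu out) := by unfold Spec_joyGo; infer_instance

-- ===== CLAIM (what is proved, stated in full; the proofs are below) =====
def Claim_equal_joyGo : Prop := ∀ (string : String) (bakuhatsu : String), Dom_joyGo string bakuhatsu → Spec_joyGo string bakuhatsu (joyGo string bakuhatsu)

-- ===== LEMMAS AND PROOFS =====

-- A's guard "stack[len(stack)-len(b):] == b" says exactly "b is a suffix of the stack"
theorem guard_iff (b st : List Char) :
    (PySem.List.slice st (some ((st.length : Int) - (b.length : Int))) none = b) ↔ b <:+ st := by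
  rw [PySem.List.slice_some_none]
  constructor
  · intro h; rw [← h]; exact List.drop_suffix _ _
  · intro h
    obtain ⟨t, rfl⟩ := h
    have harg : ((((t ++ b).length : Nat) : Int) - ((b.length : Nat) : Int)) = ((t.length : Nat) : Int) := by
      push_cast [List.length_append]; ring
    rw [harg, PySem.List.clampIdx_natCast,
        min_eq_left (by simp [List.length_append]), List.drop_left]

-- iterated pop = take
theorem foldl_dropLast (m : Nat) (st : List Char) :
    (List.range m).foldl (fun t _ => t.dropLast) st = st.take (st.length - m) := by
  induction m with
  | zero => simp
  | succ k ih =>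
    rw [List.range_succ, List.foldl_append, List.foldl_cons, List.foldl_nil, ih,
        List.dropLast_eq_take, List.length_take, List.take_take]
    congr 1
    omega

-- an occurrence in p ++ [c] lies inside p or ends at the very end
theorem infix_append_singleton {b p : List Char} {c : Char} (h : b <:+: p ++ [c]) :
    b <:+: p ∨ b <:+ p ++ [c] := by
  obtain ⟨u, t, hut⟩ := h
  rcases List.eq_nil_or_concat t with rfl | ⟨t', c', rfl⟩
  · right; exact ⟨u, by simpa using hut⟩
  · left
    have : (u ++ b ++ t') ++ [c'] = p ++ [c] := by simpa using hut
    have hp : u ++ b ++ t' = p := (List.append_inj' this (by simp)).1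
    exact ⟨u, t', hp⟩

-- converse of find_spec: a position that is an occurrence with none before it IS find's result
theorem find_eq_of (s b : List Char) (j : Nat) (h1 : b <+: s.drop j)
    (h2 : ∀ i < j, ¬ b <+: s.drop i) : PySem.Chars.find s b = (j : Int) := by
  have hinf : b <:+: s := by
    obtain ⟨t, ht⟩ := h1
    exact ⟨s.take j, t, by rw [List.append_assoc, ht, List.take_append_drop]⟩
  have h0 : 0 ≤ PySem.Chars.find s b := (PySem.Chars.find_nonneg_iff s b).mpr hinf
  obtain ⟨hf1, hf2⟩ := PySem.Chars.find_spec (s := s) (sub := b) h0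
  have : (PySem.Chars.find s b).toNat = j := by
    by_contra hne
    rcases Nat.lt_or_ge (PySem.Chars.find s b).toNat j with hlt | hge
    · exact h2 _ hlt hf1
    · exact hf2 j (by omega) h1
  omega

-- main invariant: if the stack p is bomb-free, A's remaining scan equals B's fixpoint on p ++ cs
theorem loopA_eq_fix (b : List Char) (hb : b ≠ []) :
    ∀ (cs p : List Char), ¬ b <:+: p → joyGoLoopA b p cs = fixLoop b (p ++ cs) := by
  intro cs
  induction cs with
  | nil =>
    intro p hp
    rw [fixLoop, dif_neg hb,
        dif_pos ((PySem.Chars.find_eq_neg_one_iff (p ++ []) b).mpr (by simpa using hp))]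
    simp [joyGoLoopA]
  | cons c cs ih =>
    intro p hp
    have hbpos : 0 < b.length := List.length_pos_iff.mpr hb
    simp only [joyGoLoopA]
    by_cases hm : b <:+ p ++ [c]
    · rw [if_pos ((guard_iff b _).mpr hm), foldl_dropLast]
      obtain ⟨t, ht⟩ := hm
      have hbl : b.length ≤ p.length + 1 := by
        have := congrArg List.length ht; simp at this; omega
      set j : Nat := p.length + 1 - b.length with hj
      have hjt : j = t.length := by
        have := congrArg List.length ht; simp at this; omega
      -- find (p ++ c :: cs) b = j
      have hfind : PySem.Chars.find (p ++ c :: cs) b = (j : Int) := by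
        apply find_eq_of
        · have hdrop : (p ++ c :: cs).drop j = b ++ cs := by
            rw [show p ++ c :: cs = (p ++ [c]) ++ cs by simp, ← ht,
                List.append_assoc, hjt, List.drop_left]
          rw [hdrop]; exact ⟨cs, rfl⟩
        · intro i hi hpre
          apply hp
          have hil : i + b.length ≤ p.length := by omega
          -- the occurrence at i < j lies entirely inside p
          obtain ⟨u, hu⟩ := hpre
          have hb' : b = ((p ++ c :: cs).drop i).take b.length := by
            rw [← hu]; simp
          have hdp : ((p ++ c :: cs).drop i).take b.length = (p.drop i).take b.length := by
            rw [List.drop_append (l₁ := p), List.take_append]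
            have h1 : (b.length - (p.drop i).length) = 0 := by simp; omega
            have h2 : i - p.length = 0 := by omega
            rw [h1, h2]
            simp
          have hbp : b <+: p.drop i := by
            rw [hdp] at hb'
            exact hb' ▸ List.take_prefix _ _
          exact hbp.isInfix.trans (List.drop_suffix i p).isInfix
      -- unfold fixLoop once on the B side
      rw [fixLoop, dif_neg hb,
          dif_neg (by rw [hfind]; omega : ¬ PySem.Chars.find (p ++ c :: cs) b = -1),
          hfind]
      have hjnat : ((j : Int)).toNat = j := by omega
      rw [hjnat]
      have htake : (p ++ c :: cs).take j = (p ++ [c]).take j := by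
        rw [show p ++ c :: cs = (p ++ [c]) ++ cs by simp, List.take_append]
        have h1 : j - (p ++ [c]).length = 0 := by simp; omega
        rw [h1]; simp
      have hdrop2 : (p ++ c :: cs).drop (j + b.length) = cs := by
        rw [show p ++ c :: cs = (p ++ [c]) ++ cs by simp]
        have h1 : j + b.length = (p ++ [c]).length := by simp; omega
        rw [h1, List.drop_left]
      rw [htake, hdrop2]
      have hplen : (p ++ [c]).length - b.length = j := by simp; omega
      rw [← hplen]
      -- the new stack is a prefix of p, hence bomb-free
      have hpref : (p ++ [c]).take ((p ++ [c]).length - b.length) <+: p := by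
        rw [List.take_append]
        have h1 : (p ++ [c]).length - b.length - p.length = 0 := by simp; omega
        rw [h1]
        simpa using List.take_prefix _ p
      have hfree : ¬ b <:+: (p ++ [c]).take ((p ++ [c]).length - b.length) := fun hinf =>
        hp (hinf.trans hpref.isInfix)
      exact ih _ hfree
    · rw [if_neg (fun h => hm ((guard_iff b _).mp h))]
      have hfree : ¬ b <:+: p ++ [c] := by
        intro h
        rcases infix_append_singleton h with h' | h'
        · exact hp h'
        · exact hm h'
      have := ih (p ++ [c]) hfree
      rw [this]
      congr 1
      simp
-- when the bomb is empty, A's guard is always true and the 0 pops do nothing: the stack collects everything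
theorem loopA_nil (cs : List Char) : ∀ p, joyGoLoopA [] p cs = p ++ cs := by
  induction cs with
  | nil => intro p; simp [joyGoLoopA]
  | cons c cs ih =>
    intro p
    simp only [joyGoLoopA]
    have hguard : PySem.List.slice (p ++ [c]) (some (((p ++ [c]).length : Int) - (([] : List Char).length : Int))) none = ([] : List Char) := by
      rw [guard_iff]; exact ⟨p ++ [c], by simp⟩
    rw [if_pos hguard]
    simp [List.range_zero, ih]

-- ===== VERDICT (by name: the statement is the Claim_ definition above) =====
theorem joyGo_spec : Claim_equal_joyGo := by
  intro string bakuhatsu _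
  simp only [Spec_joyGo, joyGo, joyGo_alt]
  by_cases hb : bakuhatsu.toList = []
  · rw [hb]
    rw [loopA_nil string.toList []]
    simp
  · have h := loopA_eq_fix bakuhatsu.toList hb string.toList [] (by
      simp only [List.infix_nil]
      exact hb)
    simp only [List.nil_append] at h
    rw [h]
    simp [hb]
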